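-- pv_equiv track=rewrite | github.com/Torphage/Slitherlink | generator/shapes/hexagon.py | get_junctions
-- ===== SOURCE A (Python) =====
-- def get_junctions(size: int) -> list[tuple[int, int, int]]:
--     """Returns a list of tuples containing the row index, the length of the row
--     and the column index of the first cell in the row.
--
--     :param size: how many cells on one side of the hexagon
--     :return: (row index, column length, column index)
--     """
--     num_junctions = sum([6 * i for i in range(1, 2 * size, 2)])
--     upperhalf = num_junctions // 2
--     row = 0
--     j = 0
--     junctions = []
--     width = 0
--     increased = False
--     for _ in range(upperhalf):
--         if j >= width + size:
--             if not increased: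
--                 width += 1
--                 increased = True
--             else:
--                 increased = False
--             j = 0
--             row += 1
--         junctions.append((row, width + size, j))
--         j += 1
--
--     temp = junctions[:]
--     temp.reverse()
--     temp = [(4 * size - 1 - t[0], t[1], t[1] - t[2] - 1) for t in temp]
--     junctions.extend(temp)
--     return junctions
-- ===== SOURCE B (Python) =====
-- def get_junctions(size: int) -> list[tuple[int, int, int]]:
--     """Returns a list of tuples containing the row index, the length of the row
--     and the column index of the first cell in the row."""
--     junctions = []
--     for r in range(4 * size):
--         rr = r if r < 2 * size else 4 * size - 1 - r
--         length = size + (rr + 1) // 2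
--         junctions.extend((r, length, c) for c in range(length))
--     return junctions
-- ===== Notes on version B (the rewrite author's own statement) =====
-- stated objective: simpler
-- what changed: Replaces the stateful flag-toggle loop (row/j/width/increased counters) that builds the upper half plus the reverse-and-transform pass that mirrors it with a single pass over all rows whose width is computed in closed form from the row index via the tent map.
import Mathlib
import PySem

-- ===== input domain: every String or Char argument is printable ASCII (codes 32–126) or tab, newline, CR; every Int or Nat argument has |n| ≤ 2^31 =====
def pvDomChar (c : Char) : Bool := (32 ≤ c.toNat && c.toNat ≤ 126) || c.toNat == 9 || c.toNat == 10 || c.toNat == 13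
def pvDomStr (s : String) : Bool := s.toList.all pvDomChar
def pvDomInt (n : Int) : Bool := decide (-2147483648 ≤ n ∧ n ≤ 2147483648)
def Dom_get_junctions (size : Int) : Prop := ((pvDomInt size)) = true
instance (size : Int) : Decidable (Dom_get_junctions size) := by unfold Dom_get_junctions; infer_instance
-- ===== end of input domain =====

-- B replaces A's stateful flag-toggle loop plus reverse-and-transform mirroring by one pass over
-- the 4*size rows with the row width computed in closed form (objective: simpler).

-- ===== PORT A =====
-- the body of A's 'for _ in range(upperhalf)' loop, on the state (row, j, junctions, width, increased)
def hexStep (size : Int) :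
    Int × Int × List (Int × Int × Int) × Int × Bool → Int × Int × List (Int × Int × Int) × Int × Bool
  | (row, j, junctions, width, increased) =>
    if width + size ≤ j then
      let wi : Int × Bool := if increased = false then (width + 1, true) else (width, false)
      -- j reset to 0, the append uses the updated row/width, then j += 1
      (row + 1, 1, junctions ++ [(row + 1, wi.1 + size, 0)], wi.1, wi.2)
    else
      (row, j + 1, junctions ++ [(row, width + size, j)], width, increased)

def get_junctions (size : Int) : List (Int × Int × Int) :=
  let num_junctions := ((PySem.List.pyRange 1 (2 * size) 2).map (fun i => 6 * i)).sum
  let upperhalf := PySem.Int.floordiv num_junctions 2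
  let st := (PySem.List.pyRange 0 upperhalf 1).foldl (fun st _ => hexStep size st)
    (0, 0, ([] : List (Int × Int × Int)), 0, false)
  let junctions := st.2.2.1
  let temp := junctions.reverse.map (fun t => (4 * size - 1 - t.1, t.2.1, t.2.1 - t.2.2 - 1))
  junctions ++ temp

-- ===== PORT B =====
def get_junctions_alt (size : Int) : List (Int × Int × Int) :=
  (PySem.List.pyRange 0 (4 * size) 1).foldl
    (fun junctions r =>
      let rr := if r < 2 * size then r else 4 * size - 1 - r
      let length := size + PySem.Int.floordiv (rr + 1) 2
      junctions ++ (PySem.List.pyRange 0 length 1).map (fun c => (r, length, c)))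
    []

-- ===== PRECONDITION & SPEC =====
def Spec_get_junctions (size : Int) (out : List (Int × Int × Int)) : Prop := out = get_junctions_alt size
instance (size : Int) (out : List (Int × Int × Int)) : Decidable (Spec_get_junctions size out) := by unfold Spec_get_junctions; infer_instance

-- ===== CLAIM (what is proved, stated in full; the proofs are below) =====
def Claim_equal_get_junctions : Prop := ∀ (size : Int), Dom_get_junctions size → Spec_get_junctions size (get_junctions size)

-- ===== LEMMAS AND PROOFS =====

-- one row of the output: (r, w, 0), (r, w, 1), …, (r, w, w-1)
def rowBlock (r w : Int) : List (Int × Int × Int) :=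
  (PySem.List.pyRange 0 w 1).map (fun c => (r, w, c))

-- width of row r (0 ≤ r < 4s is the used range; ediv = Python // on this range)
def wid (s r : Int) : Int := s + (r + 1) / 2

-- number of loop iterations of A needed to finish rows 0..r
def Mfun (s : Int) : Nat → Nat
  | 0 => s.toNat
  | r + 1 => Mfun s r + (wid s ((r : Int) + 1)).toNat

lemma flatMap_congr_mem {α β : Type} (l : List α) (f g : α → List β)
    (h : ∀ x ∈ l, f x = g x) : l.flatMap f = l.flatMap g := by
  induction l with
  | nil => rfl
  | cons a t ih =>
    simp only [List.flatMap_cons]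
    rw [h a (by simp), ih (fun x hx => h x (by simp [hx]))]

lemma foldl_ignore {α β : Type} (g : β → β) (l : List α) (init : β) :
    l.foldl (fun st _ => g st) init = g^[l.length] init := by
  induction l generalizing init with
  | nil => rfl
  | cons a t ih => simp [List.foldl_cons, ih, Function.iterate_succ_apply]

lemma sum_odd_six (n : Nat) :
    ((List.range n).map (fun k : Nat => (6 : Int) * (1 + 2 * (k : Int)))).sum = 6 * (n : Int) * (n : Int) := by
  induction n with
  | zero => simp
  | succ m ih =>
    rw [List.range_succ, List.map_append, List.sum_append, ih]
    simp only [List.map_cons, List.map_nil, List.sum_cons, List.sum_nil]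
    push_cast
    ring

lemma midRow (s : Int) : ∀ (k : Nat) (row j : Int) (acc : List (Int × Int × Int)) (width : Int) (inc : Bool),
    j + k = width + s →
    (hexStep s)^[k] (row, j, acc, width, inc) =
      (row, width + s, acc ++ (PySem.List.pyRange j (width + s) 1).map (fun c => (row, width + s, c)), width, inc) := by
  intro k
  induction k with
  | zero =>
    intro row j acc width inc hk
    have hj : j = width + s := by omega
    subst hj
    simp [PySem.List.pyRange_one_eq_nil le_rfl]
  | succ m ih =>
    intro row j acc width inc hk
    have hlt : j < width + s := by omega
    rw [Function.iterate_succ_apply]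
    have hstep : hexStep s (row, j, acc, width, inc) =
        (row, j + 1, acc ++ [(row, width + s, j)], width, inc) := by
      simp [hexStep, not_le.mpr hlt]
    rw [hstep, ih row (j + 1) (acc ++ [(row, width + s, j)]) width inc (by omega),
      PySem.List.pyRange_one_cons hlt]
    simp

lemma mainRow (s : Int) (hs : 0 < s) : ∀ r : Nat,
    (hexStep s)^[Mfun s r] (0, 0, ([] : List (Int × Int × Int)), 0, false) =
      ((r : Int), wid s r,
        (PySem.List.pyRange 0 ((r : Int) + 1) 1).flatMap (fun i => rowBlock i (wid s i)),
        ((r : Int) + 1) / 2, decide (r % 2 = 1)) := by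
  intro r
  induction r with
  | zero =>
    simp only [Mfun, Nat.cast_zero]
    rw [midRow s s.toNat 0 0 [] 0 false (by omega)]
    have h1 : wid s 0 = s := by unfold wid; norm_num
    have h2 : ((0 : Int) + 1) / 2 = 0 := by norm_num
    rw [PySem.List.pyRange_one_singleton]
    simp [h1, rowBlock]
  | succ m ih =>
    have hW : wid s ((m : Int) + 1) = s + ((m : Int) + 2) / 2 := by unfold wid; ring_nf
    have hWpos : 0 < wid s ((m : Int) + 1) := by
      have : (0:Int) ≤ ((m : Int) + 2) / 2 := by positivity
      omega
    have hsplit : Mfun s (m + 1) = ((wid s ((m : Int) + 1)).toNat - 1) + 1 + Mfun s m := by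
      simp only [Mfun]; omega
    rw [hsplit, Function.iterate_add_apply, ih,
      Function.iterate_add_apply, Function.iterate_one]
    -- one step: completes row m, starts row m+1
    have hstep : hexStep s ((m : Int), wid s (m : Int),
        (PySem.List.pyRange 0 ((m : Int) + 1) 1).flatMap (fun i => rowBlock i (wid s i)),
        ((m : Int) + 1) / 2, decide (m % 2 = 1)) =
        ((m : Int) + 1, 1,
          (PySem.List.pyRange 0 ((m : Int) + 1) 1).flatMap (fun i => rowBlock i (wid s i)) ++
            [((m : Int) + 1, wid s ((m : Int) + 1), 0)],
          ((m : Int) + 2) / 2, decide ((m + 1) % 2 = 1)) := by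
      have hcond : ((m : Int) + 1) / 2 + s ≤ wid s (m : Int) := by unfold wid; omega
      obtain ⟨t, ht | ht⟩ := Nat.even_or_odd' m
      · -- m even: increased flag is false, width grows
        have hb : decide (m % 2 = 1) = false := by subst ht; simp [Nat.mul_mod_right]
        have hb2 : decide ((m + 1) % 2 = 1) = true := by rw [decide_eq_true_eq]; omega
        simp only [hexStep, if_pos hcond, hb, hb2]
        have e1 : ((m : Int) + 1) / 2 + 1 = ((m : Int) + 2) / 2 := by
          subst ht; push_cast; omega
        have e2 : ((m : Int) + 2) / 2 + s = wid s ((m : Int) + 1) := by rw [hW]; ring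
        simp [e1, e2]
      · -- m odd: increased flag is true, width unchanged
        have hb : decide (m % 2 = 1) = true := by rw [decide_eq_true_eq]; omega
        have hb2 : decide ((m + 1) % 2 = 1) = false := by rw [decide_eq_false_iff_not]; omega
        simp only [hexStep, if_pos hcond, hb, hb2]
        have e1 : ((m : Int) + 1) / 2 = ((m : Int) + 2) / 2 := by
          subst ht; push_cast; omega
        have e2 : ((m : Int) + 1) / 2 + s = wid s ((m : Int) + 1) := by
          rw [hW, ← e1]; ring
        rw [← e1]
        simp [e2]
    rw [hstep, midRow s ((wid s ((m : Int) + 1)).toNat - 1) ((m : Int) + 1) 1 _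
      (((m : Int) + 2) / 2) (decide ((m + 1) % 2 = 1)) (by rw [hW]; omega)]
    have hrange : PySem.List.pyRange 0 ((m : Int) + 1 + 1) 1 =
        PySem.List.pyRange 0 ((m : Int) + 1) 1 ++ [(m : Int) + 1] :=
      PySem.List.pyRange_one_succ_right (by omega)
    have hblock : rowBlock ((m : Int) + 1) (wid s ((m : Int) + 1)) =
        ((m : Int) + 1, wid s ((m : Int) + 1), 0) ::
          (PySem.List.pyRange 1 (wid s ((m : Int) + 1)) 1).map
            (fun c => ((m : Int) + 1, wid s ((m : Int) + 1), c)) := by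
      unfold rowBlock
      rw [PySem.List.pyRange_one_cons hWpos]
      simp
    have hfin : ((m : Int) + 2) / 2 + s = wid s ((m : Int) + 1) := by rw [hW]; ring
    push_cast
    rw [hfin, hrange]
    simp only [List.flatMap_append, List.flatMap_cons, List.flatMap_nil, List.append_nil,
      hblock, List.append_assoc, List.cons_append, List.nil_append]
    have : ((m : Int) + 1 + 1) = (m : Int) + 2 := by ring
    rw [this]

lemma Mfun_closed (s : Int) (hs : 0 < s) : ∀ r : Nat,
    (Mfun s r : Int) = ((r : Int) + 1) * s + (((r : Int) + 1) / 2) * (((r : Int) + 2) / 2) := by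
  intro r
  induction r with
  | zero =>
    simp only [Mfun, Nat.cast_zero]
    rw [Int.toNat_of_nonneg (by omega)]
    norm_num
  | succ m ih =>
    have hwid : (0:Int) ≤ wid s ((m : Int) + 1) := by
      have : (0:Int) ≤ ((m : Int) + 1 + 1) / 2 := by positivity
      unfold wid; omega
    have hcast : ((Mfun s (m + 1) : Nat) : Int) = (Mfun s m : Int) + wid s ((m : Int) + 1) := by
      simp only [Mfun]
      push_cast [Int.toNat_of_nonneg hwid]
      ring
    rw [hcast, ih]
    unfold wid
    push_cast
    obtain ⟨t, ht | ht⟩ := Int.even_or_odd' (m : Int)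
    · rw [ht]
      have e3 : (2*t+1+1)/2 = t+1 := by omega
      have e4 : (2*t+1+2)/2 = t+1 := by omega
      have e1 : (2*t+1)/2 = t := by omega
      have e2 : (2*t+2)/2 = t+1 := by omega
      simp only [e3, e4, e1, e2]
      ring
    · rw [ht]
      have e3 : (2*t+1+1+1)/2 = t+1 := by omega
      have e4 : (2*t+1+1+2)/2 = t+2 := by omega
      have e1 : (2*t+1+1)/2 = t+1 := by omega
      have e2 : (2*t+1+2)/2 = t+1 := by omega
      simp only [e3, e4, e1, e2]
      ring

lemma mirrorBlock (s r w : Int) :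
    ((rowBlock r w).reverse).map (fun t => (4 * s - 1 - t.1, t.2.1, t.2.1 - t.2.2 - 1)) =
      rowBlock (4 * s - 1 - r) w := by
  apply List.ext_getElem
  · simp [rowBlock]
  · intro k h1 h2
    simp only [rowBlock, List.getElem_map, List.getElem_reverse]
    have hlen : (PySem.List.pyRange 0 w 1).length = w.toNat := by
      simp [PySem.List.length_pyRange_one]
    have hk : k < w.toNat := by simpa [rowBlock, hlen] using h2
    rw [PySem.List.getElem_pyRange_one, PySem.List.getElem_pyRange_one]
    have hl : (List.map (fun c => (r, w, c)) (PySem.List.pyRange 0 w 1)).length = w.toNat := by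
      simp [hlen]
    simp only [Prod.mk.injEq, hl, true_and]
    omega

-- ===== VERDICT (by name: the statement is the Claim_ definition above) =====
-- pointwise description of B: one pass over the 4s rows
lemma alt_flatMap (s : Int) :
    get_junctions_alt s = (PySem.List.pyRange 0 (4 * s) 1).flatMap
      (fun r => rowBlock r (wid s (if r < 2 * s then r else 4 * s - 1 - r))) := by
  have hfd : ∀ a : Int, PySem.Int.floordiv a 2 = a / 2 :=
    fun a => PySem.Int.floordiv_eq_ediv_of_pos (by norm_num)
  simp only [get_junctions_alt, hfd]
  rw [PySem.List.foldl_append_eq_flatMap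
    (fun r => (PySem.List.pyRange 0 (s + ((if r < 2 * s then r else 4 * s - 1 - r) + 1) / 2) 1).map
      (fun c => (r, s + ((if r < 2 * s then r else 4 * s - 1 - r) + 1) / 2, c)))]
  rfl

-- the upper half produced by A's loop, for s > 0
lemma loop_junctions (s : Int) (hs : 0 < s) :
    ((PySem.List.pyRange 0 (PySem.Int.floordiv ((PySem.List.pyRange 1 (2 * s) 2).map (fun i => 6 * i)).sum 2) 1).foldl
      (fun st _ => hexStep s st) (0, 0, ([] : List (Int × Int × Int)), 0, false)).2.2.1 =
      (PySem.List.pyRange 0 (2 * s) 1).flatMap (fun i => rowBlock i (wid s i)) := by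
  have hsum : ((PySem.List.pyRange 1 (2 * s) 2).map (fun i => 6 * i)).sum = 6 * s * s := by
    rw [PySem.List.pyRange_of_pos 1 (2 * s) (by norm_num : (0:Int) < 2), if_pos (by omega)]
    have hn : ((2 * s - 1 + 2 - 1) / 2).toNat = s.toNat := by omega
    rw [hn, List.map_map]
    have : ((fun i => (6:Int) * i) ∘ fun k : Nat => 1 + 2 * (k : Int)) =
        fun k : Nat => (6 : Int) * (1 + 2 * (k : Int)) := rfl
    rw [this, sum_odd_six]
    rw [Int.toNat_of_nonneg (by omega)]
  have hup : PySem.Int.floordiv (6 * s * s) 2 = 3 * s * s := by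
    rw [PySem.Int.floordiv_eq_ediv_of_pos (by norm_num)]
    have : 6 * s * s = 3 * s * s * 2 := by ring
    rw [this, Int.mul_ediv_cancel _ (by norm_num)]
  rw [hsum, hup, foldl_ignore]
  set q : Int := 3 * s * s with hq
  have hqM : (Mfun s (2 * s - 1).toNat : Int) = q := by
    rw [Mfun_closed s hs, Int.toNat_of_nonneg (by omega)]
    have d1 : (2 * s - 1 + 1) / 2 = s := by omega
    have d2 : (2 * s - 1 + 2) / 2 = s := by omega
    rw [d1, d2, hq]
    ring
  have hqnn : 0 ≤ q := by omega
  have hlen : (PySem.List.pyRange 0 q 1).length = Mfun s (2 * s - 1).toNat := by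
    rw [PySem.List.length_pyRange_one]
    omega
  rw [hlen, mainRow s hs]
  have hr : (((2 * s - 1).toNat : Nat) : Int) + 1 = 2 * s := by
    rw [Int.toNat_of_nonneg (by omega)]; ring
  simp only [hr]

theorem get_junctions_spec : Claim_equal_get_junctions := by
  intro s _
  unfold Spec_get_junctions
  rw [alt_flatMap]
  by_cases hs : 0 < s
  · -- positive size
    have hA : get_junctions s =
        ((PySem.List.pyRange 0 (2 * s) 1).flatMap (fun i => rowBlock i (wid s i))) ++
          ((PySem.List.pyRange 0 (2 * s) 1).flatMap (fun i => rowBlock i (wid s i))).reverse.map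
            (fun t => (4 * s - 1 - t.1, t.2.1, t.2.1 - t.2.2 - 1)) := by
      simp only [get_junctions]
      rw [loop_junctions s hs]
    rw [hA]
    rw [PySem.List.pyRange_one_append 0 (2 * s) (4 * s) (by omega) (by omega), List.flatMap_append]
    congr 1
    · -- upper half: the 'if' is true on the first 2s rows
      apply flatMap_congr_mem
      intro r hr
      rw [PySem.List.mem_pyRange_one] at hr
      rw [if_pos hr.2]
    · -- lower half: mirror of the upper half
      rw [List.reverse_flatMap, List.map_flatMap]
      have hrev : (PySem.List.pyRange 0 (2 * s) 1).reverse =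
          (List.range (2 * s).toNat).map (fun k : Nat => 2 * s - 1 - (k : Int)) := by
        have h := PySem.List.pyRange_neg_one_eq_reverse (2 * s - 1) (-1)
        have e1 : (-1 : Int) + 1 = 0 := by norm_num
        have e2 : 2 * s - 1 + 1 = 2 * s := by ring
        rw [e1, e2] at h
        rw [← h, PySem.List.pyRange_neg_one]
        have e3 : (2 * s - 1 - (-1)) = 2 * s := by ring
        rw [e3]
      have hfwd : PySem.List.pyRange (2 * s) (4 * s) 1 =
          (List.range (2 * s).toNat).map (fun k : Nat => 2 * s + (k : Int)) := by
        rw [PySem.List.pyRange_one]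
        have : (4 * s - 2 * s) = 2 * s := by ring
        rw [this]
      rw [hrev, hfwd, List.flatMap_map, List.flatMap_map]
      apply flatMap_congr_mem
      intro k _
      simp only [Function.comp]
      rw [mirrorBlock]
      rw [if_neg (by omega)]
      have e4 : 4 * s - 1 - (2 * s - 1 - (k : Int)) = 2 * s + (k : Int) := by ring
      have e5 : 4 * s - 1 - (2 * s + (k : Int)) = 2 * s - 1 - (k : Int) := by ring
      rw [e4, e5]
  · -- size ≤ 0: both sides are empty
    have h0 : (4 : Int) * s ≤ 0 := by omega
    rw [PySem.List.pyRange_one_eq_nil h0, List.flatMap_nil]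
    simp only [get_junctions]
    rw [PySem.List.pyRange_of_pos 1 (2 * s) (by norm_num : (0:Int) < 2), if_neg (by omega)]
    simp only [List.range_zero, List.map_nil, List.sum_nil]
    have : PySem.Int.floordiv 0 2 = 0 := by
      rw [PySem.Int.floordiv_eq_ediv_of_pos (by norm_num)]
      norm_num
    rw [this, PySem.List.pyRange_one_eq_nil le_rfl]
    simp
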